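-- pv_equiv track=rewrite | github.com/MrBrantCode/unitest_baseline | mut_generate/mist_train_cf/cf_61602/solution.py | find_max_pairs
-- ===== SOURCE A (Python) =====
-- def find_max_pairs(pairs):
--     # initialize max_value and max_pairs
--     max_value = float('-inf')
--     max_pairs = []
--
--     # loop through each pair
--     for pair in pairs:
--         # loop through each number in the pair
--         for num in pair:
--             # if current number is greater than max_value
--             if num > max_value:
--                 max_value = num  # update max_value
--                 max_pairs = [pair]  # update max_pairs
--             elif num == max_value:  # if current number is equal to max_value
--                 max_pairs.append(pair)  # add the pair to max_pairs
--
--     return max_value, max_pairs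
-- ===== SOURCE B (Python) =====
-- def find_max_pairs(pairs):
--     # pass 1: the maximum over all numbers
--     max_value = max(num for pair in pairs for num in pair)
--     # pass 2: one entry per occurrence of the maximum, in order
--     max_pairs = [pair for pair in pairs for num in pair if num == max_value]
--     return max_value, max_pairs
-- ===== Notes on version B (the rewrite author's own statement) =====
-- stated objective: simpler
-- what changed: Replaces A's single interleaved loop that maintains and resets a running max and a running pair list with two cleanly separated passes: one reduction computing the maximum, then one comprehension collecting a pair per occurrence of that maximum.
-- outside the precondition, e.g. on find_max_pairs([[], []]): A returns (-inf, []), B raises ValueError; on find_max_pairs([]): A returns (-inf, []), B raises ValueError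
import Mathlib
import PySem

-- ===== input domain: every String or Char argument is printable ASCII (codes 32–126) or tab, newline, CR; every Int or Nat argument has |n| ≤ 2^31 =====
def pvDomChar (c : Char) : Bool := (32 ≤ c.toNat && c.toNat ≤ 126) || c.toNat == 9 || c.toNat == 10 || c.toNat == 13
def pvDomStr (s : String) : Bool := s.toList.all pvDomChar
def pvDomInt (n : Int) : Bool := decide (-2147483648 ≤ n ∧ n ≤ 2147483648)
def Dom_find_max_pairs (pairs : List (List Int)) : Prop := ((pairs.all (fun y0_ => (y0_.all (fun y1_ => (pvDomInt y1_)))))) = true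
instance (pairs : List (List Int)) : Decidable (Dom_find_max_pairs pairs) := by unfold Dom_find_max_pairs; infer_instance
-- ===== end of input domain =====

-- B replaces A's single interleaved running-max loop with two separate passes
-- (a max reduction, then a comprehension over occurrences); objective: simpler.

-- ===== PORT A =====
-- A's inner-loop body: max_value is modelled as Option Int (none = float('-inf'),
-- which every int exceeds); the pair list is the second state component.
def pvStepA (pair : List Int) (st : Option Int × List (List Int)) (num : Int) :
    Option Int × List (List Int) :=
  match st.1 with
  | none => (some num, [pair])
  | some m =>
    if num > m then (some num, [pair])
    else if num = m then (some m, st.2 ++ [pair])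
    else st

def find_max_pairs (pairs : List (List Int)) : Int × List (List Int) :=
  let st := pairs.foldl (fun st pair => pair.foldl (pvStepA pair) st)
      ((none : Option Int), ([] : List (List Int)))
  -- on Pre_ the state holds some max; the getD default is never reached there
  (st.1.getD 0, st.2)

-- ===== PORT B =====
def find_max_pairs_alt (pairs : List (List Int)) : Int × List (List Int) :=
  match PySem.List.max? (pairs.flatMap (fun pair => pair)) (fun x => x) with
  | none => (0, [])   -- Source B's max() raises ValueError here; outside Pre_
  | some max_value =>
    (max_value,
     pairs.flatMap (fun pair =>
       (pair.filter (fun num => num = max_value)).map (fun _ => pair)))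

-- ===== PRECONDITION & SPEC =====
-- Pre_ excludes inputs whose pairs contain no numbers at all: there A returns
-- float('-inf') (not an int) and B's max() raises ValueError.
def Pre_find_max_pairs (pairs : List (List Int)) : Prop :=
  pairs.flatMap (fun pair => pair) ≠ []
instance (pairs : List (List Int)) : Decidable (Pre_find_max_pairs pairs) := by
  unfold Pre_find_max_pairs; infer_instance

def pvWitness_find_max_pairs : List (List Int) := [[1, 2], [2]]

def Spec_find_max_pairs (pairs : List (List Int)) (out : Int × List (List Int)) : Prop :=
  out = find_max_pairs_alt pairs
instance (pairs : List (List Int)) (out : Int × List (List Int)) :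
    Decidable (Spec_find_max_pairs pairs out) := by unfold Spec_find_max_pairs; infer_instance

-- ===== CLAIM =====
def Claim_equal_find_max_pairs : Prop :=
  ∀ (pairs : List (List Int)), Dom_find_max_pairs pairs → Pre_find_max_pairs pairs →
    Spec_find_max_pairs pairs (find_max_pairs pairs)

-- ===== LEMMAS AND PROOFS =====

-- occurrence list: one (enclosing pair, number) entry per number, in A's visit order
def pvOcc (pairs : List (List Int)) : List (List Int × Int) :=
  pairs.flatMap (fun p => p.map (fun n => (p, n)))

theorem pvOcc_snd (pairs : List (List Int)) :
    (pvOcc pairs).map Prod.snd = pairs.flatMap (fun pair => pair) := by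
  simp [pvOcc, List.map_flatMap, List.map_map]

theorem pvFoldA_occ (pairs : List (List Int)) (st : Option Int × List (List Int)) :
    pairs.foldl (fun st pair => pair.foldl (pvStepA pair) st) st
      = (pvOcc pairs).foldl (fun st pn => pvStepA pn.1 st pn.2) st := by
  induction pairs generalizing st with
  | nil => rfl
  | cons p t ih =>
    simp only [pvOcc, List.flatMap_cons, List.foldl_append, List.foldl_cons, List.foldl_map]
    rw [ih]
    rfl

theorem pvLeFold (t : List (List Int × Int)) : ∀ a : Int, a ≤ t.foldl (fun a pn => max a pn.2) a := by
  induction t with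
  | nil => intro a; simp
  | cons h2 t2 ih2 => intro a; exact le_trans (le_max_left _ _) (ih2 (max a h2.2))

theorem pvFilterConsFst (p : List Int) (n M : Int) (t : List (List Int × Int)) :
    (List.filter (fun pn => decide (pn.2 = M)) ((p, n) :: t)).map Prod.fst
      = (if n = M then [p] else [])
          ++ (List.filter (fun pn => decide (pn.2 = M)) t).map Prod.fst := by
  by_cases h : n = M <;> simp [h]

theorem pvCore (l : List (List Int × Int)) (m : Int) (mp : List (List Int)) :
    l.foldl (fun st pn => pvStepA pn.1 st pn.2) (some m, mp)
      = (some (l.foldl (fun a pn => max a pn.2) m),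
         (if m = l.foldl (fun a pn => max a pn.2) m then mp else [])
           ++ (l.filter (fun pn => decide (pn.2 = l.foldl (fun a pn => max a pn.2) m))).map Prod.fst) := by
  induction l generalizing m mp with
  | nil => simp
  | cons hd t ih =>
    obtain ⟨p, n⟩ := hd
    simp only [List.foldl_cons]
    rcases lt_trichotomy m n with h | h | h
    · have hstep : pvStepA p (some m, mp) n = (some n, [p]) := by
        simp [pvStepA, h]
      rw [hstep, ih]
      have hmax : max m n = n := max_eq_right (le_of_lt h)
      simp only [hmax]
      have hMn : n ≤ t.foldl (fun a pn => max a pn.2) n := pvLeFold t n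
      have hm : m ≠ t.foldl (fun a pn => max a pn.2) n := by omega
      rw [if_neg hm, pvFilterConsFst]
      simp
    · subst h
      have hstep : pvStepA p (some m, mp) m = (some m, mp ++ [p]) := by
        simp [pvStepA]
      rw [hstep, ih]
      simp only [max_self]
      rw [pvFilterConsFst]
      by_cases hm : m = t.foldl (fun a pn => max a pn.2) m
      · simp [← hm]
      · simp [hm]
    · have hstep : pvStepA p (some m, mp) n = (some m, mp) := by
        simp only [pvStepA]
        rw [if_neg (by omega), if_neg (by omega)]
      rw [hstep, ih]
      have hmax : max m n = m := max_eq_left (le_of_lt h)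
      simp only [hmax]
      have hMn : m ≤ t.foldl (fun a pn => max a pn.2) m := pvLeFold t m
      have hne : n ≠ t.foldl (fun a pn => max a pn.2) m := by omega
      rw [pvFilterConsFst, if_neg hne]
      simp

theorem pvCompEq (pairs : List (List Int)) (M : Int) :
    pairs.flatMap (fun pair => (pair.filter (fun num => num = M)).map (fun _ => pair))
      = ((pvOcc pairs).filter (fun pn => decide (pn.2 = M))).map Prod.fst := by
  simp only [pvOcc, List.filter_flatMap, List.map_flatMap, List.filter_map, List.map_map]
  rfl

-- ===== VERDICT =====
theorem find_max_pairs_spec : Claim_equal_find_max_pairs := by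
  intro pairs _ hpre
  unfold Spec_find_max_pairs
  unfold Pre_find_max_pairs at hpre
  have hocc : pvOcc pairs ≠ [] := by
    intro he
    apply hpre
    have := pvOcc_snd pairs
    rw [he] at this
    exact this.symm
  obtain ⟨⟨p, n⟩, t, het⟩ := List.exists_cons_of_ne_nil hocc
  have hflat : pairs.flatMap (fun pair => pair) = n :: t.map Prod.snd := by
    rw [← pvOcc_snd, het]; rfl
  unfold find_max_pairs
  rw [pvFoldA_occ, het]
  have hfirst : pvStepA p ((none : Option Int), ([] : List (List Int))) n = (some n, [p]) := by
    rfl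
  simp only [List.foldl_cons, hfirst]
  rw [pvCore]
  unfold find_max_pairs_alt
  rw [hflat, PySem.List.max?_id_cons]
  simp only [List.foldl_map]
  rw [pvCompEq, het, pvFilterConsFst]
  rfl
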